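-- pv_equiv track=rewrite | github.com/nastya98eremeeva-beep/bilet | solvers.py | solve_task8_segments
-- ===== SOURCE A (Python) =====
-- def solve_task8_segments(p: tuple, q: tuple, r: tuple, options: list) -> str:
--     """
--     Задание 8: P, Q, R — отрезки [a,b]. Формула ((x∈P)→(x∈Q)) ∧ ((x∉A)→(x∈R)) тождественно ложна.
--     options: список из 4 отрезков [a,b]. Вернуть номер 1-4.
--     """
--     def in_seg(x, seg):
--         return seg[0] <= x <= seg[1]
--
--     for ans_idx, A in enumerate(options):
--         ok = True
--         for x in range(-5, 260):  # проверка по целым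
--             in_p, in_q, in_r = in_seg(x, p), in_seg(x, q), in_seg(x, r)
--             in_a = in_seg(x, A)
--             imp_pq = (not in_p) or in_q
--             imp_ar = (in_a) or in_r
--             if imp_pq and imp_ar:
--                 ok = False
--                 break
--         if ok:
--             return str(ans_idx + 1)
--     return ''
-- ===== SOURCE B (Python) =====
-- def solve_task8_segments(p: tuple, q: tuple, r: tuple, options: list) -> str:
--     # Integer points in [-5,259] where (x in P) -> (x in Q) holds, computed ONCE.
--     pts = [x for x in range(-5, 260)
--            if x < p[0] or x > p[1] or (q[0] <= x <= q[1])]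
--     # If some such point lies in R, the formula is satisfiable for EVERY option A.
--     if any(r[0] <= x <= r[1] for x in pts):
--         return ''
--     for i, (a, b) in enumerate(options, 1):
--         if not any(a <= x <= b for x in pts):
--             return str(i)
--     return ''
-- ===== Notes on version B (the rewrite author's own statement) =====
-- stated objective: alternative
-- what changed: B precomputes once the integer points in [-5,259] satisfying (x in P)->(x in Q) and hoists the option-independent R-clause test out of the option loop (if it hits, no option can work); each option is then tested only against that precomputed point list instead of re-evaluating all four clauses over the full 265-point range per option.
import Mathlib
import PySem

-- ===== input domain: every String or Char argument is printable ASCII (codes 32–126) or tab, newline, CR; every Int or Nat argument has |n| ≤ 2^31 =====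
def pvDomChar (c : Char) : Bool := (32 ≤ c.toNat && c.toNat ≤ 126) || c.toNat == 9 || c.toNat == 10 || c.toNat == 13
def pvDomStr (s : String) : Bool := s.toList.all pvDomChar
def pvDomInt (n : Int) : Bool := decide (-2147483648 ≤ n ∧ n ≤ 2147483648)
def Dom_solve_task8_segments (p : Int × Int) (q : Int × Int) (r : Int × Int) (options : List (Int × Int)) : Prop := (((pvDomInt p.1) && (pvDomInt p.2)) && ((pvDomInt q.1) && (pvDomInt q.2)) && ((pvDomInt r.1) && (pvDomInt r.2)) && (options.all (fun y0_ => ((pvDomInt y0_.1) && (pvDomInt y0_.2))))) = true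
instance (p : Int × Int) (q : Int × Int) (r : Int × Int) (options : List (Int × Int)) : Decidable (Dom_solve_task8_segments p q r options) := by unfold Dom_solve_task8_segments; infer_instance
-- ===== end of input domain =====

-- B precomputes the integer points of [-5,259] where (x∈P)→(x∈Q) once and hoists the
-- option-independent R test out of the option loop; only the return value is compared.


-- ===== PORT A =====
-- in_seg helper of A
def pvInSeg (x : Int) (seg : Int × Int) : Bool := decide (seg.1 ≤ x) && decide (x ≤ seg.2)

-- A's inner loop over range(-5,260) with break; returns the flag `ok`
def pvLoopA (p q r A : Int × Int) : List Int → Bool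
  | [] => true
  | x :: xs =>
    let in_p := pvInSeg x p
    let in_q := pvInSeg x q
    let in_r := pvInSeg x r
    let in_a := pvInSeg x A
    let imp_pq := !in_p || in_q
    let imp_ar := in_a || in_r
    if imp_pq && imp_ar then false else pvLoopA p q r A xs

-- A's outer loop over enumerate(options)
def pvOuterA (p q r : Int × Int) : List (Int × Int) → Int → String
  | [], _ => ""
  | A :: rest, idx =>
    if pvLoopA p q r A (PySem.List.pyRange (-5) 260 1) then PySem.Int.toStr (idx + 1)
    else pvOuterA p q r rest (idx + 1)

def solve_task8_segments (p : Int × Int) (q : Int × Int) (r : Int × Int) (options : List (Int × Int)) : String :=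
  pvOuterA p q r options 0

-- ===== PORT B =====
-- the comprehension: integer points of [-5,259] where (x∈P)→(x∈Q)
def pvPtsB (p q : Int × Int) : List Int :=
  (PySem.List.pyRange (-5) 260 1).filter
    (fun x => decide (x < p.1) || decide (p.2 < x) || (decide (q.1 ≤ x) && decide (x ≤ q.2)))

-- B's option scan over enumerate(options, 1)
def pvScanB (pts : List Int) : List (Int × Int) → Int → String
  | [], _ => ""
  | A :: rest, i =>
    if !(pts.any fun x => decide (A.1 ≤ x) && decide (x ≤ A.2)) then PySem.Int.toStr i
    else pvScanB pts rest (i + 1)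

def solve_task8_segments_alt (p : Int × Int) (q : Int × Int) (r : Int × Int) (options : List (Int × Int)) : String :=
  let pts := pvPtsB p q
  if pts.any (fun x => decide (r.1 ≤ x) && decide (x ≤ r.2)) then ""
  else pvScanB pts options 1

-- ===== PRECONDITION & SPEC =====
def Spec_solve_task8_segments (p : Int × Int) (q : Int × Int) (r : Int × Int) (options : List (Int × Int)) (out : String) : Prop := out = solve_task8_segments_alt p q r options
instance (p : Int × Int) (q : Int × Int) (r : Int × Int) (options : List (Int × Int)) (out : String) : Decidable (Spec_solve_task8_segments p q r options out) := by unfold Spec_solve_task8_segments; infer_instance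

-- ===== CLAIM (what is proved, stated in full; the proofs are below) =====
def Claim_equal_solve_task8_segments : Prop := ∀ (p : Int × Int) (q : Int × Int) (r : Int × Int) (options : List (Int × Int)), Dom_solve_task8_segments p q r options → Spec_solve_task8_segments p q r options (solve_task8_segments p q r options)

-- ===== LEMMAS AND PROOFS =====

theorem pvBoolSplit (P a b X Y : Bool) :
    ((P && (a || b)) || (X || Y)) = (((P && a) || X) || ((P && b) || Y)) := by
  cases P <;> cases a <;> cases b <;> cases X <;> cases Y <;> rfl

-- the break condition of A's inner loop, as a predicate
def pvCondA (p q r A : Int × Int) (x : Int) : Bool :=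
  ((!pvInSeg x p) || pvInSeg x q) && (pvInSeg x A || pvInSeg x r)

theorem pvLoopA_eq_any (p q r A : Int × Int) (xs : List Int) :
    pvLoopA p q r A xs = !(xs.any (pvCondA p q r A)) := by
  induction xs with
  | nil => rfl
  | cons x xs ih =>
    simp only [pvLoopA, pvCondA, List.any_cons, Bool.not_or]
    split_ifs with h
    · simp [h]
    · simp [h, ih]

-- pointwise: the break condition is "in pts" && (in A || in R)
theorem pvCondA_factor (p q r A : Int × Int) (x : Int) :
    pvCondA p q r A x =
      ((decide (x < p.1) || decide (p.2 < x) || (decide (q.1 ≤ x) && decide (x ≤ q.2)))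
        && (pvInSeg x A || pvInSeg x r)) := by
  rw [Bool.eq_iff_iff]
  simp only [pvCondA, pvInSeg, Bool.and_eq_true, Bool.or_eq_true, Bool.not_eq_eq_eq_not,
    Bool.not_true, decide_eq_true_eq, Bool.and_eq_false_iff, decide_eq_false_iff_not]
  constructor <;> intro h <;> (try constructor) <;> omega

theorem pvAny_cond_split (p q r A : Int × Int) :
    ((PySem.List.pyRange (-5) 260 1).any (pvCondA p q r A)) =
      ((pvPtsB p q).any (fun x => pvInSeg x A) || (pvPtsB p q).any (fun x => pvInSeg x r)) := by
  simp only [pvPtsB, List.any_filter]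
  have hfun : pvCondA p q r A = fun x =>
      ((decide (x < p.1) || decide (p.2 < x) || (decide (q.1 ≤ x) && decide (x ≤ q.2)))
        && (pvInSeg x A || pvInSeg x r)) := funext (pvCondA_factor p q r A)
  rw [hfun]
  generalize PySem.List.pyRange (-5) 260 1 = l
  induction l with
  | nil => rfl
  | cons y ys ih =>
    simp only [List.any_cons]
    rw [ih]
    exact pvBoolSplit _ _ _ _ _

-- with no R-hit in pts, A's outer loop is B's scan (index shifted by one)
theorem pvOuterA_eq_scan (p q r : Int × Int)
    (hR : (pvPtsB p q).any (fun x => pvInSeg x r) = false) :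
    ∀ (opts : List (Int × Int)) (idx : Int),
      pvOuterA p q r opts idx = pvScanB (pvPtsB p q) opts (idx + 1) := by
  intro opts
  induction opts with
  | nil => intro idx; rfl
  | cons A rest ih =>
    intro idx
    simp only [pvOuterA, pvScanB, pvLoopA_eq_any, pvAny_cond_split, hR, Bool.or_false]
    have : (pvPtsB p q).any (fun x => pvInSeg x A)
        = (pvPtsB p q).any (fun x => decide (A.1 ≤ x) && decide (x ≤ A.2)) := by
      simp [pvInSeg]
    rw [this]
    split_ifs with h
    · rfl
    · exact ih (idx + 1)

-- with an R-hit in pts, every option's inner loop breaks, so A returns ""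
theorem pvOuterA_all_fail (p q r : Int × Int)
    (hR : (pvPtsB p q).any (fun x => pvInSeg x r) = true) :
    ∀ (opts : List (Int × Int)) (idx : Int), pvOuterA p q r opts idx = "" := by
  intro opts
  induction opts with
  | nil => intro idx; rfl
  | cons A rest ih =>
    intro idx
    simp only [pvOuterA, pvLoopA_eq_any, pvAny_cond_split, hR, Bool.or_true, Bool.not_true,
      Bool.false_eq_true, if_false]
    exact ih (idx + 1)

-- ===== VERDICT (by name: the statement is the Claim_ definition above) =====
theorem solve_task8_segments_spec : Claim_equal_solve_task8_segments := by
  intro p q r options _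
  unfold Spec_solve_task8_segments solve_task8_segments solve_task8_segments_alt
  have hRB : (pvPtsB p q).any (fun x => decide (r.1 ≤ x) && decide (x ≤ r.2))
      = (pvPtsB p q).any (fun x => pvInSeg x r) := by simp [pvInSeg]
  by_cases hR : (pvPtsB p q).any (fun x => pvInSeg x r) = true
  · simp only [hRB, hR, if_true]
    exact pvOuterA_all_fail p q r hR options 0
  · have hR' := Bool.eq_false_iff.mpr hR
    simp only [hRB, hR', Bool.false_eq_true, if_false]
    have := pvOuterA_eq_scan p q r hR' options 0
    simpa using this
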